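-- pv_equiv track=rewrite | github.com/ritafridman/Matthew | SOURCE/algorithm.py | countOp
-- ===== SOURCE A (Python) =====
-- def countOp(lst):
--
--     checkStr = ''
--     lstF = []
--
--     for i in range(len(lst)):
--         checkStr = checkStr+str(lst[i])
--
--
--     lstF.append(checkStr.count('*'))
--     lstF.append(checkStr.count('/'))
--     lstF.append(checkStr.count('('))
--
--     countP = checkStr.count('+')
--     countS = checkStr.count('-')
--     psSum = countP+countS
--
--     lstF.append(psSum)
--
--     return lstF
-- ===== SOURCE B (Python) =====
-- def countOp(lst):
--     # One tabulating pass over the characters of each element: no concatenated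
--     # string and no repeated .count scans.
--     star = slash = paren = pm = 0
--     for s in lst:
--         for ch in str(s):
--             if ch == '*':
--                 star += 1
--             elif ch == '/':
--                 slash += 1
--             elif ch == '(':
--                 paren += 1
--             elif ch == '+' or ch == '-':
--                 pm += 1
--     return [star, slash, paren, pm]
-- ===== Notes on version B (the rewrite author's own statement) =====
-- stated objective: alternative
-- what changed: Instead of concatenating all elements into one string and scanning it five times with .count, B tallies the four counters in a single pass over the characters of each element, building no intermediate string; it trades C-level scans for one explicit tabulating loop.
import Mathlib
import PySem

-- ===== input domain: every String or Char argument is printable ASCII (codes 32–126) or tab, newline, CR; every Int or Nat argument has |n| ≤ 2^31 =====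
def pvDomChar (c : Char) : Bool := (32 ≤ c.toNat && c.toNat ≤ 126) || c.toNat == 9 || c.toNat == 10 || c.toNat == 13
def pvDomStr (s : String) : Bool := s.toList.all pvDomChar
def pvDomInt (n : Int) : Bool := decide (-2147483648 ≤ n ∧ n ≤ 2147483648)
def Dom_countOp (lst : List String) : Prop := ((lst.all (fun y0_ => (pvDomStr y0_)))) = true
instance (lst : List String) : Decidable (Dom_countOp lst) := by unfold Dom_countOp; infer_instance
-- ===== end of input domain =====

-- B replaces A's build-one-big-string-then-scan-it-five-times with a single tallying
-- pass over the characters of each element (alternative algorithm: one tabulating pass, no intermediate string).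

-- ===== PORT A =====
-- for i in range(len(lst)): checkStr = checkStr + str(lst[i])  (str of a str is itself)
def countOp (lst : List String) : List Int :=
  let checkStr : String :=
    (PySem.List.pyRange 0 (PySem.List.len lst)).foldl
      (fun s i => s ++ PySem.List.pyGetD lst i "") ""
  let lstF : List Int := []
  let lstF := lstF ++ [(PySem.Str.count checkStr "*" : Int)]
  let lstF := lstF ++ [(PySem.Str.count checkStr "/" : Int)]
  let lstF := lstF ++ [(PySem.Str.count checkStr "(" : Int)]
  let countP : Int := (PySem.Str.count checkStr "+" : Int)
  let countS : Int := (PySem.Str.count checkStr "-" : Int)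
  let psSum := countP + countS
  let lstF := lstF ++ [psSum]
  lstF

-- ===== PORT B =====
-- one step of the tally: the if/elif chain of Source B in the same order
def countOpStep (t : Int × Int × Int × Int) (ch : Char) : Int × Int × Int × Int :=
  if ch == '*' then (t.1 + 1, t.2.1, t.2.2.1, t.2.2.2)
  else if ch == '/' then (t.1, t.2.1 + 1, t.2.2.1, t.2.2.2)
  else if ch == '(' then (t.1, t.2.1, t.2.2.1 + 1, t.2.2.2)
  else if ch == '+' || ch == '-' then (t.1, t.2.1, t.2.2.1, t.2.2.2 + 1)
  else t

def countOp_alt (lst : List String) : List Int :=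
  let t := lst.foldl (fun t s => s.toList.foldl countOpStep t) (0, 0, 0, 0)
  [t.1, t.2.1, t.2.2.1, t.2.2.2]

-- ===== PRECONDITION & SPEC =====
def Spec_countOp (lst : List String) (out : List Int) : Prop := out = countOp_alt lst
instance (lst : List String) (out : List Int) : Decidable (Spec_countOp lst out) := by unfold Spec_countOp; infer_instance

-- ===== CLAIM (what is proved, stated in full; the proofs are below) =====
def Claim_equal_countOp : Prop := ∀ (lst : List String), Dom_countOp lst → Spec_countOp lst (countOp lst)

-- ===== LEMMAS AND PROOFS =====

-- Python's str.count with a single-char needle is the plain character count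
theorem chars_count_go_singleton (c : Char) (cs : List Char) (fuel acc : Nat)
    (h : cs.length ≤ fuel) :
    PySem.Chars.count.go [c] fuel cs acc = acc + cs.count c := by
  induction cs generalizing fuel acc with
  | nil => cases fuel <;> simp [PySem.Chars.count.go]
  | cons x t ih =>
    cases fuel with
    | zero => simp at h
    | succ n =>
      simp only [List.length_cons, Nat.succ_le_succ_iff] at h
      by_cases hx : x = c
      · subst hx
        simp [PySem.Chars.count.go, List.isPrefixOf, ih n (acc + 1) h]
        omega
      · simp [PySem.Chars.count.go, List.isPrefixOf, hx, ih n acc h, Ne.symm hx]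

theorem chars_count_singleton (c : Char) (cs : List Char) :
    PySem.Chars.count cs [c] = cs.count c := by
  simpa [PySem.Chars.count] using chars_count_go_singleton c cs cs.length 0 (le_refl _)

-- A's concatenation loop builds exactly the flattened character list
theorem checkStr_toList (lst : List String) :
    ((PySem.List.pyRange 0 (PySem.List.len lst)).foldl
      (fun s i => s ++ PySem.List.pyGetD lst i "") "").toList
    = (lst.map String.toList).flatten := by
  rw [PySem.List.foldl_pyRange_pyGetD lst "" (fun s x => s ++ x) "" (le_refl 0)]
  simp only [Int.toNat_zero, List.drop_zero]
  suffices h : ∀ (init : String),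
      (lst.foldl (fun s x => s ++ x) init).toList
        = init.toList ++ (lst.map String.toList).flatten by
    simpa using h ""
  induction lst with
  | nil => simp
  | cons x t ih => intro init; simp [ih]

-- the tally fold adds the four per-character counts componentwise
theorem foldl_countOpStep (cs : List Char) (t : Int × Int × Int × Int) :
    cs.foldl countOpStep t
      = (t.1 + cs.count '*', t.2.1 + cs.count '/', t.2.2.1 + cs.count '(',
         t.2.2.2 + cs.count '+' + cs.count '-') := by
  induction cs generalizing t with
  | nil => simp
  | cons x s ih =>
    simp only [List.foldl_cons, ih, countOpStep, List.count_cons]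
    by_cases h1 : x = '*' <;> by_cases h2 : x = '/' <;> by_cases h3 : x = '(' <;>
      by_cases h4 : x = '+' <;> by_cases h5 : x = '-' <;>
      simp_all [Prod.ext_iff] <;> omega

theorem countOp_alt_eq (lst : List String) :
    countOp_alt lst
      = [((lst.map String.toList).flatten.count '*' : Int),
         ((lst.map String.toList).flatten.count '/' : Int),
         ((lst.map String.toList).flatten.count '(' : Int),
         ((lst.map String.toList).flatten.count '+' : Int)
           + ((lst.map String.toList).flatten.count '-' : Int)] := by
  unfold countOp_alt
  have : lst.foldl (fun t s => s.toList.foldl countOpStep t) ((0 : Int), (0 : Int), (0 : Int), (0 : Int))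
      = (lst.map String.toList).flatten.foldl countOpStep (0, 0, 0, 0) := by
    rw [List.foldl_flatten]
    simp [List.foldl_map]
  rw [this, foldl_countOpStep]
  simp

-- ===== VERDICT (by name: the statement is the Claim_ definition above) =====
theorem countOp_spec : Claim_equal_countOp := by
  intro lst _
  unfold Spec_countOp countOp
  rw [countOp_alt_eq]
  simp only [PySem.Str.count_eq, checkStr_toList]
  have h1 : ("*" : String).toList = ['*'] := rfl
  have h2 : ("/" : String).toList = ['/'] := rfl
  have h3 : ("(" : String).toList = ['('] := rfl
  have h4 : ("+" : String).toList = ['+'] := rfl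
  have h5 : ("-" : String).toList = ['-'] := rfl
  simp [h1, h2, h3, h4, h5, chars_count_singleton]
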